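-- pv_equiv track=rewrite | github.com/8ctavio89/Juego-de-Baraja-Francesa-con-clases- | pares.py | puntaje
-- ===== SOURCE A (Python) =====
-- def puntaje(lista_diccionarios):
--
--     lista_puntaje = []
--     puntaje = 0
--     cantidad_pares = 0
--     cantidad_trios = 0
--     index = -1
--
--     for elemento in lista_diccionarios:
--         if elemento[1] >= 2:
--             lista_puntaje.append(elemento)
--             if elemento[1] % 2 == 0:
--                 cantidad_pares += 1
--             if elemento[1] % 3 == 0:
--                 cantidad_trios += 1
--             index += 1
--
--             for carta in range(len(lista_puntaje)-index):
--                 cartas = lista_puntaje[index]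
--                 puntaje += cartas[0]*cartas[1]
--
--
--     return puntaje, cantidad_pares, cantidad_trios
-- ===== SOURCE B (Python) =====
-- def puntaje(lista_diccionarios):
--     # Divide-and-conquer: the triple (score, pairs, trios) is a componentwise-sum
--     # monoid, so reduce the list by splitting it in half and combining the halves.
--     def go(lo, hi):
--         if hi - lo == 0:
--             return (0, 0, 0)
--         if hi - lo == 1:
--             e = lista_diccionarios[lo]
--             if e[1] >= 2:
--                 return (e[0] * e[1],
--                         1 if e[1] % 2 == 0 else 0,
--                         1 if e[1] % 3 == 0 else 0)
--             return (0, 0, 0)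
--         mid = (lo + hi) // 2
--         a = go(lo, mid)
--         b = go(mid, hi)
--         return (a[0] + b[0], a[1] + b[1], a[2] + b[2])
--     return go(0, len(lista_diccionarios))
-- ===== Notes on version B (the rewrite author's own statement) =====
-- stated objective: alternative
-- what changed: Replaces A's single stateful left-to-right loop (with its lista_puntaje/index bookkeeping and degenerate inner range-loop) by a divide-and-conquer recursion that splits the index range in half and combines the two half-triples componentwise, exploiting that (score, pairs, trios) is a componentwise-sum monoid.
import Mathlib
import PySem

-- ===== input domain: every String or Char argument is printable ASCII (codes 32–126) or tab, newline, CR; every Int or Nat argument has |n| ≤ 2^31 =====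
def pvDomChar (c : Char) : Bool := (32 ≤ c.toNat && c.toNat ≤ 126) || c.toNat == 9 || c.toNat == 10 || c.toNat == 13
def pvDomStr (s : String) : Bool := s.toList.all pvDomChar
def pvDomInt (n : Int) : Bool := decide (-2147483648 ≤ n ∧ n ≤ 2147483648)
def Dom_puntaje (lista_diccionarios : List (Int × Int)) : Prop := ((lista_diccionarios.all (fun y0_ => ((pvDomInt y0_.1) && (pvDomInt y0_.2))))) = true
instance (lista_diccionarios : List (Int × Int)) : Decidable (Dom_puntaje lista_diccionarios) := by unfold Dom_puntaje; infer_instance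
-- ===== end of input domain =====

-- B replaces A's single stateful loop (lista_puntaje/index bookkeeping, inner range-loop) by a
-- divide-and-conquer recursion combining half-triples componentwise; objective: alternative.

-- ===== PORT A =====
-- state: (lista_puntaje, puntaje, cantidad_pares, cantidad_trios, index)
def puntajeStep (st : List (Int × Int) × Int × Int × Int × Int) (elemento : Int × Int) :
    List (Int × Int) × Int × Int × Int × Int :=
  let (lp, p, cp, ct, idx) := st
  if 2 ≤ elemento.2 then
    let lp' := lp ++ [elemento]
    let cp' := if PySem.Int.mod elemento.2 2 = 0 then cp + 1 else cp
    let ct' := if PySem.Int.mod elemento.2 3 = 0 then ct + 1 else ct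
    let idx' := idx + 1
    -- for carta in range(len(lista_puntaje)-index): puntaje += lista_puntaje[index][0]*lista_puntaje[index][1]
    -- the default of pyGetD is never used: index is always a valid index of lista_puntaje here
    let p' := (PySem.List.pyRange 0 ((lp'.length : Int) - idx') 1).foldl
        (fun acc _ =>
          let cartas := PySem.List.pyGetD lp' idx' ((0 : Int), (0 : Int))
          acc + cartas.1 * cartas.2) p
    (lp', p', cp', ct', idx')
  else st

def puntaje (lista_diccionarios : List (Int × Int)) : Int × Int × Int :=
  let st := lista_diccionarios.foldl puntajeStep ([], 0, 0, 0, -1)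
  (st.2.1, st.2.2.1, st.2.2.2.1)

-- ===== PORT B =====
-- go(lo, hi): divide-and-conquer over the index range [lo, hi).
-- lista_diccionarios[lo] with 0 ≤ lo < len is List.getD (exact there; the default is never used).
def puntajeGo (l : List (Int × Int)) (lo hi : Nat) : Int × Int × Int :=
  if hi - lo = 0 then (0, 0, 0)
  else if hi - lo = 1 then
    let e := l.getD lo ((0 : Int), (0 : Int))
    if 2 ≤ e.2 then
      (e.1 * e.2,
       if PySem.Int.mod e.2 2 = 0 then 1 else 0,
       if PySem.Int.mod e.2 3 = 0 then 1 else 0)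
    else (0, 0, 0)
  else
    let mid := (lo + hi) / 2
    let a := puntajeGo l lo mid
    let b := puntajeGo l mid hi
    (a.1 + b.1, a.2.1 + b.2.1, a.2.2 + b.2.2)
termination_by hi - lo
decreasing_by all_goals omega

def puntaje_alt (lista_diccionarios : List (Int × Int)) : Int × Int × Int :=
  puntajeGo lista_diccionarios 0 lista_diccionarios.length

-- ===== PRECONDITION & SPEC =====
def Spec_puntaje (lista_diccionarios : List (Int × Int)) (out : Int × Int × Int) : Prop := out = puntaje_alt lista_diccionarios
instance (lista_diccionarios : List (Int × Int)) (out : Int × Int × Int) : Decidable (Spec_puntaje lista_diccionarios out) := by unfold Spec_puntaje; infer_instance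

-- ===== CLAIM (what is proved, stated in full; the proofs are below) =====
def Claim_equal_puntaje : Prop := ∀ (lista_diccionarios : List (Int × Int)), Dom_puntaje lista_diccionarios → Spec_puntaje lista_diccionarios (puntaje lista_diccionarios)

-- ===== LEMMAS AND PROOFS =====

-- The common reference value: the filter-based triple.
def pvF (l : List (Int × Int)) : Int × Int × Int :=
  let f := l.filter (fun e => 2 ≤ e.2)
  ((f.map (fun e => e.1 * e.2)).sum,
   ((f.filter (fun e => PySem.Int.mod e.2 2 = 0)).length : Int),
   ((f.filter (fun e => PySem.Int.mod e.2 3 = 0)).length : Int))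

theorem pvF_append (xs ys : List (Int × Int)) :
    pvF (xs ++ ys) = ((pvF xs).1 + (pvF ys).1, (pvF xs).2.1 + (pvF ys).2.1,
                      (pvF xs).2.2 + (pvF ys).2.2) := by
  simp [pvF]

-- A's loop invariant: with index = len(lista_puntaje) - 1 on entry, the fold adds exactly
-- the filter-based reductions over the tail to the running accumulators.
theorem puntaje_loop_inv (l : List (Int × Int)) :
    ∀ (lp : List (Int × Int)) (p cp ct : Int),
      l.foldl puntajeStep (lp, p, cp, ct, (lp.length : Int) - 1) =
        (lp ++ l.filter (fun e => 2 ≤ e.2),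
         p + ((l.filter (fun e => 2 ≤ e.2)).map (fun e => e.1 * e.2)).sum,
         cp + (((l.filter (fun e => 2 ≤ e.2)).filter (fun e => PySem.Int.mod e.2 2 = 0)).length : Int),
         ct + (((l.filter (fun e => 2 ≤ e.2)).filter (fun e => PySem.Int.mod e.2 3 = 0)).length : Int),
         ((lp ++ l.filter (fun e => 2 ≤ e.2)).length : Int) - 1) := by
  induction l with
  | nil => intro lp p cp ct; simp
  | cons e l ih =>
    intro lp p cp ct
    by_cases he : 2 ≤ e.2
    · have hstep : puntajeStep (lp, p, cp, ct, (lp.length : Int) - 1) e =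
          (lp ++ [e], p + e.1 * e.2,
           (if PySem.Int.mod e.2 2 = 0 then cp + 1 else cp),
           (if PySem.Int.mod e.2 3 = 0 then ct + 1 else ct),
           ((lp ++ [e]).length : Int) - 1) := by
        simp only [puntajeStep, if_pos he]
        have hb : ((lp ++ [e]).length : Int) - ((lp.length : Int) - 1 + 1) = 1 := by
          simp
        rw [hb]
        have hr : PySem.List.pyRange 0 1 1 = [0] := by decide
        rw [hr]
        simp only [List.foldl_cons, List.foldl_nil]
        have hidx : ((lp.length : Int) - 1 + 1) = ((lp.length : Nat) : Int) := by omega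
        rw [hidx, PySem.List.pyGetD_natCast]
        simp
      rw [List.foldl_cons, hstep, ih (lp ++ [e])]
      simp [List.filter_cons, he]
      constructor
      · ring
      constructor
      · split_ifs <;> simp <;> omega
      · split_ifs <;> simp <;> omega
    · have hstep : puntajeStep (lp, p, cp, ct, (lp.length : Int) - 1) e =
          (lp, p, cp, ct, (lp.length : Int) - 1) := by
        simp [puntajeStep, he]
      rw [List.foldl_cons, hstep, ih lp]
      simp [he]

theorem puntaje_eq_pvF (l : List (Int × Int)) : puntaje l = pvF l := by
  have h := puntaje_loop_inv l [] 0 0 0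
  simp only [List.length_nil, Nat.cast_zero, zero_sub] at h
  simp only [puntaje, pvF, h]
  simp

-- B's recursion computes the filter-based triple of the slice l[lo:hi].
theorem puntajeGo_eq_pvF (l : List (Int × Int)) :
    ∀ (n lo hi : Nat), hi - lo = n → hi ≤ l.length →
      puntajeGo l lo hi = pvF ((l.drop lo).take (hi - lo)) := by
  intro n
  induction n using Nat.strong_induction_on with
  | _ n ih =>
    intro lo hi hn hle
    rw [puntajeGo]
    by_cases h0 : hi - lo = 0
    · simp [h0, pvF]
    · by_cases h1 : hi - lo = 1
      · have hlo : lo < l.length := by omega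
        have hdrop : l.drop lo = l[lo] :: l.drop (lo + 1) := List.drop_eq_getElem_cons hlo
        have hget : l.getD lo ((0 : Int), (0 : Int)) = l[lo] := List.getD_eq_getElem l _ hlo
        simp only [h0, h1, if_neg, if_pos, hdrop, hget, List.take_succ_cons, List.take_zero]
        simp [pvF, List.filter_cons]
        by_cases he : 2 ≤ l[lo].2 <;> simp [he, List.filter_cons] <;> split_ifs <;> simp
      · simp only [h0, h1, if_neg, ite_false]
        have hmidlo : lo < (lo + hi) / 2 := by omega
        have hmidhi : (lo + hi) / 2 < hi := by omega
        rw [ih ((lo + hi) / 2 - lo) (by omega) lo ((lo + hi) / 2) rfl (by omega),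
            ih (hi - (lo + hi) / 2) (by omega) ((lo + hi) / 2) hi rfl hle]
        have hsplit : (l.drop lo).take (hi - lo) =
            (l.drop lo).take ((lo + hi) / 2 - lo) ++ (l.drop ((lo + hi) / 2)).take (hi - (lo + hi) / 2) := by
          have : hi - lo = ((lo + hi) / 2 - lo) + (hi - (lo + hi) / 2) := by omega
          have h2 : lo + ((lo + hi) / 2 - lo) = (lo + hi) / 2 := by omega
          rw [this, List.take_add, List.drop_drop, h2]
        rw [hsplit, pvF_append]

theorem puntaje_alt_eq_pvF (l : List (Int × Int)) : puntaje_alt l = pvF l := by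
  rw [puntaje_alt, puntajeGo_eq_pvF l (l.length - 0) 0 l.length rfl (le_refl _)]
  simp

-- ===== VERDICT (by name: the statement is the Claim_ definition above) =====
theorem puntaje_spec : Claim_equal_puntaje := by
  intro l _
  show puntaje l = puntaje_alt l
  rw [puntaje_eq_pvF, puntaje_alt_eq_pvF]
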